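-- pv_equiv track=rewrite | github.com/Kolyamba-mamba/technology-partner-search-module | modules/helpers/saoSelector.py | find_trim_sentence
-- ===== SOURCE A (Python) =====
-- from typing import List
--
-- def find_trim_sentence(sentences: List[str]):
--     is_cropped = False
--     trim_sentences = []
--     trim_sentence = ""
--     words_of_cut_part = ['which', 'where', 'wherein']
--     for sentence in sentences:
--         if len(sentence) > 0:
--             words = sentence.split()
--             for i, word in enumerate(words):
--                 if word in words_of_cut_part:
--                     trim_sentence = ' '.join(words[:i])
--                     is_cropped = True
--                     break
--                 elif word == 'and':
--                     if i > 0: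
--                         if words[i-1][-1] == ',':
--                             trim_sentence = ' '.join(words[:i])
--                             is_cropped = True
--                             break
--                 elif word == 'such':
--                     if i < len(words)-1:
--                         if words[i+1] == 'as':
--                             trim_sentence = ' '.join(words[:i])
--                             is_cropped = True
--                             break
--
--             if is_cropped:
--                 trim_sentences.append(trim_sentence)
--             else:
--                 trim_sentences.append(sentence)
--             is_cropped = False
--     return trim_sentences
-- ===== SOURCE B (Python) =====
-- from typing import List
--
-- CUT_WORDS = ('which', 'where', 'wherein')
--
-- def find_trim_sentence(sentences: List[str]):
--     trimmed = []
--     for sentence in sentences: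
--         if not sentence:
--             continue
--         words = sentence.split()
--         n = len(words)
--         cuts = [i for i in range(n) if words[i] in CUT_WORDS]
--         cuts += [i for i in range(1, n) if words[i] == 'and' and words[i - 1].endswith(',')]
--         cuts += [i for i in range(n - 1) if words[i] == 'such' and words[i + 1] == 'as']
--         trimmed.append(' '.join(words[:min(cuts)]) if cuts else sentence)
--     return trimmed
-- ===== Notes on version B (the rewrite author's own statement) =====
-- stated objective: alternative
-- what changed: Replaces A's single interleaved scan with a first-match break by three independent comprehensions collecting all candidate cut indices (cut-words; 'and' after a comma; 'such as'), then trims at the minimum index if any.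
import Mathlib
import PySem

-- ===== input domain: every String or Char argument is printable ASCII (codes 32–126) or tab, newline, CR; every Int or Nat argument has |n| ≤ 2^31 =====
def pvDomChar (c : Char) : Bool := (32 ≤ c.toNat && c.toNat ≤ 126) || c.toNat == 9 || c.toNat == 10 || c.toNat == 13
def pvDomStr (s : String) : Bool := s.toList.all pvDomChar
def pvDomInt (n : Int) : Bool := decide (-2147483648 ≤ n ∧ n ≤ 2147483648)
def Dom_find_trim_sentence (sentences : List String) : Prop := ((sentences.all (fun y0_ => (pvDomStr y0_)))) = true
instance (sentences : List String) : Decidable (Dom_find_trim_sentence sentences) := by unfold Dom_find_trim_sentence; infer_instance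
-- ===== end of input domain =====

-- B replaces A's single interleaved first-match scan by three comprehensions collecting all
-- candidate cut indices, trimming at their minimum; same cost, different decomposition.

-- ===== PORT A =====
-- A's inner 'for i, word in enumerate(words)' loop with its three break conditions;
-- returns some trim_sentence at the break, none if the loop falls through (is_cropped stays False).
def pvTrimScanA (words : List String) (i : Nat) : Option String :=
  if h : i < words.length then
    if words.getD i "" = "which" ∨ words.getD i "" = "where" ∨ words.getD i "" = "wherein" then
      some (PySem.Str.join " " (PySem.List.slice words none (some (i : Int))))
    else if words.getD i "" = "and" then
      if 0 < i then
        if PySem.Str.pyGet? (words.getD (i - 1) "") (-1) = some ',' then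
          some (PySem.Str.join " " (PySem.List.slice words none (some (i : Int))))
        else pvTrimScanA words (i + 1)
      else pvTrimScanA words (i + 1)
    else if words.getD i "" = "such" then
      if i < words.length - 1 then
        if words.getD (i + 1) "" = "as" then
          some (PySem.Str.join " " (PySem.List.slice words none (some (i : Int))))
        else pvTrimScanA words (i + 1)
      else pvTrimScanA words (i + 1)
    else pvTrimScanA words (i + 1)
  else none
termination_by words.length - i

def find_trim_sentence (sentences : List String) : List String :=
  sentences.foldl
    (fun trim_sentences sentence =>
      if 0 < PySem.Str.len sentence then
        let words := PySem.Str.split₀ sentence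
        match pvTrimScanA words 0 with
        | some trim_sentence => trim_sentences ++ [trim_sentence]
        | none => trim_sentences ++ [sentence]
      else trim_sentences) []

-- ===== PORT B =====
-- the three candidate-index comprehensions of Source B, concatenated
def pvCutsB (words : List String) : List Nat :=
  ((List.range words.length).filter fun i =>
      words.getD i "" == "which" || words.getD i "" == "where" || words.getD i "" == "wherein")
  ++ ((List.range' 1 (words.length - 1)).filter fun i =>
      words.getD i "" == "and" && PySem.Str.endswith (words.getD (i - 1) "") ",")
  ++ ((List.range (words.length - 1)).filter fun i =>
      words.getD i "" == "such" && words.getD (i + 1) "" == "as")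

def find_trim_sentence_alt (sentences : List String) : List String :=
  sentences.foldl
    (fun trimmed sentence =>
      if sentence = "" then trimmed
      else
        let words := PySem.Str.split₀ sentence
        match PySem.List.min? (pvCutsB words) (fun x => x) with
        | some m => trimmed ++ [PySem.Str.join " " (words.take m)]
        | none => trimmed ++ [sentence]) []

-- ===== PRECONDITION & SPEC =====
def Spec_find_trim_sentence (sentences : List String) (out : List String) : Prop := out = find_trim_sentence_alt sentences
instance (sentences : List String) (out : List String) : Decidable (Spec_find_trim_sentence sentences out) := by unfold Spec_find_trim_sentence; infer_instance

-- ===== CLAIM (what is proved, stated in full; the proofs are below) =====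
def Claim_equal_find_trim_sentence : Prop := ∀ (sentences : List String), Dom_find_trim_sentence sentences → Spec_find_trim_sentence sentences (find_trim_sentence sentences)

-- ===== LEMMAS AND PROOFS =====

-- the combined cut condition at index i (Bool, for filtering)
def pvCondB (words : List String) (i : Nat) : Bool :=
  (words.getD i "" == "which" || words.getD i "" == "where" || words.getD i "" == "wherein")
  || (words.getD i "" == "and" && decide (0 < i)
        && (PySem.Str.pyGet? (words.getD (i - 1) "") (-1) == some ','))
  || (words.getD i "" == "such" && decide (i + 1 < words.length) && (words.getD (i + 1) "" == "as"))

lemma pv_endswith_comma (w : String) :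
    (PySem.Str.endswith w "," = true) ↔ PySem.Str.pyGet? w (-1) = some ',' := by
  simp [PySem.Chars.endswith_iff, PySem.List.pyGet?_neg_one]
  constructor
  · rintro ⟨ys, h⟩; rw [← h]; simp
  · intro h; obtain ⟨ys, h⟩ := List.getLast?_eq_some_iff.mp h; exact ⟨ys, h.symm⟩

lemma pv_scan_step (words : List String) (i : Nat) (h : i < words.length) :
    pvTrimScanA words i =
      if pvCondB words i then
        some (PySem.Str.join " " (PySem.List.slice words none (some (i : Int))))
      else pvTrimScanA words (i + 1) := by
  have hiff : (i < words.length - 1) ↔ (i + 1 < words.length) := by omega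
  conv_lhs => rw [pvTrimScanA]
  rw [dif_pos h]
  by_cases hcut : (words.getD i "" = "which" ∨ words.getD i "" = "where" ∨ words.getD i "" = "wherein")
  · rw [if_pos hcut]
    rcases hcut with h1 | h1 | h1 <;> (simp only [pvCondB, List.getD_eq_getElem?_getD] at *; simp_all)
  · rw [if_neg hcut]
    push Not at hcut
    obtain ⟨h1, h2, h3⟩ := hcut
    by_cases h4 : words.getD i "" = "and"
    · rw [if_pos h4]
      by_cases hp : 0 < i
      · rw [if_pos hp]
        by_cases hc : PySem.Str.pyGet? (words.getD (i - 1) "") (-1) = some ','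
        · rw [if_pos hc]; simp only [pvCondB, List.getD_eq_getElem?_getD] at *; simp_all
        · rw [if_neg hc]; simp only [pvCondB, List.getD_eq_getElem?_getD] at *; simp_all
      · rw [if_neg hp]; simp only [pvCondB, List.getD_eq_getElem?_getD] at *; simp_all
    · rw [if_neg h4]
      by_cases h5 : words.getD i "" = "such"
      · rw [if_pos h5]
        by_cases hn : i < words.length - 1
        · rw [if_pos hn]
          by_cases has : words.getD (i + 1) "" = "as"
          · rw [if_pos has]; simp only [pvCondB, List.getD_eq_getElem?_getD] at *; simp_all
          · rw [if_neg has]; simp only [pvCondB, List.getD_eq_getElem?_getD] at *; simp_all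
        · rw [if_neg hn]
          have hn' : ¬ (i + 1 < words.length) := fun hx => hn (hiff.mpr hx)
          simp only [pvCondB, List.getD_eq_getElem?_getD] at *; simp_all
      · rw [if_neg h5]; simp only [pvCondB, List.getD_eq_getElem?_getD] at *; simp_all

lemma pv_scan_eq (words : List String) (k i : Nat) (hk : words.length - i ≤ k) :
    pvTrimScanA words i =
      (((List.range' i (words.length - i)).filter (pvCondB words)).head?).map
        (fun m => PySem.Str.join " " (PySem.List.slice words none (some (m : Int)))) := by
  induction k generalizing i with
  | zero =>
      have hge : ¬ i < words.length := by omega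
      have h0 : words.length - i = 0 := by omega
      conv_lhs => rw [pvTrimScanA]
      rw [dif_neg hge, h0]
      rfl
  | succ k ih =>
      by_cases h : i < words.length
      · rw [pv_scan_step words i h]
        have hdec : words.length - i = (words.length - (i + 1)) + 1 := by omega
        rw [hdec, List.range'_succ, List.filter_cons]
        by_cases hc : pvCondB words i = true
        · simp [hc]
        · simp only [if_neg hc]
          exact ih (i + 1) (by omega)
      · have h0 : words.length - i = 0 := by omega
        conv_lhs => rw [pvTrimScanA]
        rw [dif_neg h, h0]
        rfl

lemma pv_mem_cuts (words : List String) (m : Nat) :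
    m ∈ pvCutsB words ↔ m < words.length ∧ pvCondB words m = true := by
  simp only [pvCutsB, pvCondB, List.mem_append, List.mem_filter, List.mem_range,
    List.mem_range'_1, Bool.or_eq_true, Bool.and_eq_true, beq_iff_eq, decide_eq_true_eq,
    pv_endswith_comma]
  constructor
  · rintro ((⟨hm, hc⟩ | ⟨⟨hm1, hm2⟩, hx, hc⟩) | ⟨hm, hx, hc⟩)
    · exact ⟨hm, Or.inl (Or.inl hc)⟩
    · exact ⟨by omega, Or.inl (Or.inr ⟨⟨hx, by omega⟩, hc⟩)⟩
    · exact ⟨by omega, Or.inr ⟨⟨hx, by omega⟩, hc⟩⟩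
  · rintro ⟨hm, (hc | ⟨⟨hx, hp⟩, hc⟩) | ⟨⟨hx, hp⟩, hc⟩⟩
    · exact Or.inl (Or.inl ⟨hm, hc⟩)
    · exact Or.inl (Or.inr ⟨⟨by omega, by omega⟩, hx, hc⟩)
    · exact Or.inr ⟨by omega, hx, hc⟩

lemma pv_min_eq_head (words : List String) :
    PySem.List.min? (pvCutsB words) (fun x => x) =
      ((List.range words.length).filter (pvCondB words)).head? := by
  cases hh : ((List.range words.length).filter (pvCondB words)).head? with
  | none =>
      rw [PySem.List.min?_eq_none_iff]
      rw [List.head?_eq_none_iff] at hh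
      rw [List.eq_nil_iff_forall_not_mem]
      intro m hm
      rw [pv_mem_cuts] at hm
      have : m ∈ (List.range words.length).filter (pvCondB words) := by
        rw [List.mem_filter, List.mem_range]; exact ⟨hm.1, hm.2⟩
      rw [hh] at this
      exact absurd this (List.not_mem_nil)
  | some m =>
      obtain ⟨t, ht⟩ := List.head?_eq_some_iff.mp hh
      have hmem : m ∈ (List.range words.length).filter (pvCondB words) := by
        rw [ht]; exact List.mem_cons_self
      have hmf := List.mem_filter.mp hmem
      have hm_cuts : m ∈ pvCutsB words := by
        rw [pv_mem_cuts]; exact ⟨List.mem_range.mp hmf.1, hmf.2⟩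
      have hpw : ((List.range words.length).filter (pvCondB words)).Pairwise (· < ·) :=
        List.pairwise_lt_range.filter _
      have hmin : ∀ x ∈ (List.range words.length).filter (pvCondB words), m ≤ x := by
        intro x hx
        rw [ht] at hx hpw
        rcases List.mem_cons.mp hx with rfl | hx
        · exact le_refl x
        · exact le_of_lt ((List.pairwise_cons.mp hpw).1 x hx)
      cases hmin' : PySem.List.min? (pvCutsB words) (fun x => x) with
      | none =>
          rw [PySem.List.min?_eq_none_iff] at hmin'
          rw [hmin'] at hm_cuts
          exact absurd hm_cuts (List.not_mem_nil)
      | some m' =>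
          have hmem' := PySem.List.min?_mem hmin'
          have hle := PySem.List.min?_isMin hmin' m hm_cuts
          have hm'c := (pv_mem_cuts words m').mp hmem'
          have hmem'f : m' ∈ (List.range words.length).filter (pvCondB words) := by
            rw [List.mem_filter, List.mem_range]; exact ⟨hm'c.1, hm'c.2⟩
          have := hmin m' hmem'f
          have : m = m' := le_antisymm this hle
          rw [this]

-- ===== VERDICT (by name: the statement is the Claim_ definition above) =====
theorem find_trim_sentence_spec : Claim_equal_find_trim_sentence := by
  intro sentences _
  unfold Spec_find_trim_sentence find_trim_sentence find_trim_sentence_alt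
  apply List.foldl_ext
  intro acc s _
  by_cases hs : s = ""
  · subst hs; simp [PySem.Str.len]
  · have hlen : 0 < PySem.Str.len s := by
      simp only [PySem.Str.len_eq]
      cases hE : s.toList with
      | nil => exact absurd (String.toList_eq_nil_iff.mp hE) hs
      | cons c t => simp
    simp only [if_pos hlen, if_neg hs]
    rw [pv_scan_eq (PySem.Str.split₀ s) (PySem.Str.split₀ s).length 0 (by omega),
        pv_min_eq_head]
    rw [List.range_eq_range']
    simp only [Nat.sub_zero]
    cases ((List.range' 0 (PySem.Str.split₀ s).length).filter
        (pvCondB (PySem.Str.split₀ s))).head? with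
    | none => rfl
    | some m => simp [PySem.List.slice_to_natCast]
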